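-- pv_equiv track=rewrite | github.com/HannaLinn/resources-qaoa-protein-folding | comparison_util.py | gates_back_dir
-- ===== SOURCE A (Python) =====
-- def gates_back_dir(gate_dict, N, two_D, encoding):
--     if encoding == 'BIN' or encoding == 'BUBIN':
--         # 3D
--         if not two_D:
--             for j in range(2, N-3):
--                 # x
--                 gate_dict[6] = gate_dict[6] + 1
--                 gate_dict[5] = gate_dict[5] + 2
--                 gate_dict[4] = gate_dict[4] + 1
--
--                 # y
--                 gate_dict[6] = gate_dict[6] + 1
--                 gate_dict[5] = gate_dict[5] + 3
--                 gate_dict[4] = gate_dict[4] + 4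
--                 gate_dict[3] = gate_dict[3] + 3
--                 gate_dict[2] = gate_dict[2] + 1
--
--                 # z
--                 gate_dict[6] = gate_dict[6] + 1
--                 gate_dict[5] = gate_dict[5] + 2
--                 gate_dict[4] = gate_dict[4] + 1
--         # 2D
--         else:
--             for j in range(2, 2*N-8):
--                 gate_dict[4] = gate_dict[4] + 1
--                 gate_dict[3] = gate_dict[3] + 4
--                 gate_dict[2] = gate_dict[2] + 6
--
--     elif encoding == 'OH':
--         # 3D
--         if not two_D:
--             for j in range(2, N-3):
--                 gate_dict[2] = gate_dict[2] + 12
--         # 2D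
--         else:
--             for j in range(2, 2*N-8):
--                 gate_dict[2] = gate_dict[2] + 8
--     return gate_dict
-- ===== SOURCE B (Python) =====
-- def gates_back_dir(gate_dict, N, two_D, encoding):
--     # Closed form: the loop body is input-independent, so multiply each
--     # per-iteration increment by the iteration count.  Mutates gate_dict
--     # in place exactly like the original.
--     count = (2 * N - 10) if two_D else (N - 5)
--     if count < 0:
--         count = 0
--     if encoding == 'BIN' or encoding == 'BUBIN':
--         incs = [(4, 1), (3, 4), (2, 6)] if two_D else [(6, 3), (5, 7), (4, 6), (3, 3), (2, 1)]
--     elif encoding == 'OH':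
--         incs = [(2, 8)] if two_D else [(2, 12)]
--     else:
--         incs = []
--     if count:
--         for k, c in incs:
--             gate_dict[k] = gate_dict[k] + c * count
--     return gate_dict
-- ===== Notes on version B (the rewrite author's own statement) =====
-- stated objective: alternative
-- what changed: B replaces the per-iteration accumulation loop by a closed form: it computes the iteration count (max(0, N-5) or max(0, 2N-10)) once and adds each per-iteration increment times that count to the dictionary in a single pass.
import Mathlib
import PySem

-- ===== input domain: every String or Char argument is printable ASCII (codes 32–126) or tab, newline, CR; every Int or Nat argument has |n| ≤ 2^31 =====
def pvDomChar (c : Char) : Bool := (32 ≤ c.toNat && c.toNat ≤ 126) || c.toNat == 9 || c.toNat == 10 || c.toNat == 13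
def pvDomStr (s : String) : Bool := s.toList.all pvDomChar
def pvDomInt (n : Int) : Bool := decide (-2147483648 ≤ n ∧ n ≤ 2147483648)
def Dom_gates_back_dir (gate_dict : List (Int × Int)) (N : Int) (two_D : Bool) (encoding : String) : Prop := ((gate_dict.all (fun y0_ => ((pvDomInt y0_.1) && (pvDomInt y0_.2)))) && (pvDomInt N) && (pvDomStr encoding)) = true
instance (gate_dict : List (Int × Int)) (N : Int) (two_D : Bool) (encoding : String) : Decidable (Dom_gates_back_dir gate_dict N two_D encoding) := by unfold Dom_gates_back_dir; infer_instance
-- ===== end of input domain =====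

-- B replaces A's per-iteration accumulation loop by a closed form (each increment
-- times the iteration count, applied once); both mutate the Python dict in place
-- identically, and the equivalence proved here is about the returned dictionary.

-- ===== PORT A =====
-- 'gate_dict[k] = gate_dict[k] + c'.  Exact where key k is present (Pre_ below
-- guarantees that whenever the loop runs); on a missing key Python raises KeyError
-- where this reads the default 0 — those inputs are excluded by Pre_.
def bump (d : PySem.Dict Int Int) (k c : Int) : PySem.Dict Int Int :=
  d.insert k (d.getD k 0 + c)

def gates_back_dir (gate_dict : List (Int × Int)) (N : Int) (two_D : Bool) (encoding : String) : List (Int × Int) :=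
  let d0 : PySem.Dict Int Int := PySem.Dict.mk gate_dict
  let d :=
    if encoding = "BIN" ∨ encoding = "BUBIN" then
      if !two_D then
        -- for j in range(2, N-3): the x/y/z bumps, in source order
        (PySem.List.pyRange 2 (N - 3) 1).foldl (fun d _ =>
          bump (bump (bump (bump (bump (bump (bump (bump (bump (bump (bump d 6 1) 5 2) 4 1)
            6 1) 5 3) 4 4) 3 3) 2 1) 6 1) 5 2) 4 1) d0
      else
        (PySem.List.pyRange 2 (2 * N - 8) 1).foldl (fun d _ =>
          bump (bump (bump d 4 1) 3 4) 2 6) d0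
    else if encoding = "OH" then
      if !two_D then
        (PySem.List.pyRange 2 (N - 3) 1).foldl (fun d _ => bump d 2 12) d0
      else
        (PySem.List.pyRange 2 (2 * N - 8) 1).foldl (fun d _ => bump d 2 8) d0
    else d0
  d.items

-- ===== PORT B =====
def gates_back_dir_alt (gate_dict : List (Int × Int)) (N : Int) (two_D : Bool) (encoding : String) : List (Int × Int) :=
  let count0 : Int := if two_D then 2 * N - 10 else N - 5
  let count : Int := if count0 < 0 then 0 else count0
  let incs : List (Int × Int) :=
    if encoding = "BIN" ∨ encoding = "BUBIN" then
      if two_D then [(4, 1), (3, 4), (2, 6)] else [(6, 3), (5, 7), (4, 6), (3, 3), (2, 1)]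
    else if encoding = "OH" then
      if two_D then [(2, 8)] else [(2, 12)]
    else []
  if count = 0 then gate_dict
  else (incs.foldl (fun d p => bump d p.1 (p.2 * count)) (PySem.Dict.mk gate_dict)).items

-- ===== PRECONDITION & SPEC =====
-- the keys the selected branch reads in its loop body
def neededKeys (two_D : Bool) (encoding : String) : List Int :=
  if encoding = "BIN" ∨ encoding = "BUBIN" then
    if two_D then [4, 3, 2] else [6, 5, 4, 3, 2]
  else if encoding = "OH" then [2]
  else []

-- Pre_ excludes exactly the inputs on which Python A raises KeyError: the loop body
-- runs (iteration count positive) while some key it reads is absent from gate_dict.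
def Pre_gates_back_dir (gate_dict : List (Int × Int)) (N : Int) (two_D : Bool) (encoding : String) : Prop :=
  (0 < (if two_D then 2 * N - 10 else N - 5)) →
    ∀ k ∈ neededKeys two_D encoding, k ∈ gate_dict.map Prod.fst
instance (gate_dict : List (Int × Int)) (N : Int) (two_D : Bool) (encoding : String) : Decidable (Pre_gates_back_dir gate_dict N two_D encoding) := by unfold Pre_gates_back_dir; infer_instance

def pvWitness_gates_back_dir : (List (Int × Int)) × Int × Bool × String :=
  ([(2, 0), (3, 1), (4, 2), (5, 3), (6, 4)], 8, false, "BIN")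

def Spec_gates_back_dir (gate_dict : List (Int × Int)) (N : Int) (two_D : Bool) (encoding : String) (out : List (Int × Int)) : Prop := out = gates_back_dir_alt gate_dict N two_D encoding
instance (gate_dict : List (Int × Int)) (N : Int) (two_D : Bool) (encoding : String) (out : List (Int × Int)) : Decidable (Spec_gates_back_dir gate_dict N two_D encoding out) := by unfold Spec_gates_back_dir; infer_instance

-- ===== CLAIM (what is proved, stated in full; the proofs are below) =====
def Claim_equal_gates_back_dir : Prop := ∀ (gate_dict : List (Int × Int)) (N : Int) (two_D : Bool) (encoding : String), Dom_gates_back_dir gate_dict N two_D encoding → Pre_gates_back_dir gate_dict N two_D encoding → Spec_gates_back_dir gate_dict N two_D encoding (gates_back_dir gate_dict N two_D encoding)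

-- ===== LEMMAS AND PROOFS =====

-- two bumps at the same key fuse
theorem bump_bump_self (d : PySem.Dict Int Int) (k a b : Int) :
    bump (bump d k a) k b = bump d k (a + b) := by
  simp [bump, PySem.Dict.getD_insert_self, PySem.Dict.insert_insert_self, add_assoc]

-- two inserts at distinct keys commute as soon as one key is already present
theorem insert_insert_comm (d : PySem.Dict Int Int) (j k : Int) (vj vk : Int) (hne : k ≠ j)
    (hc : d.contains j = true ∨ d.contains k = true) :
    (d.insert j vj).insert k vk = (d.insert k vk).insert j vj := by
  apply PySem.Dict.ext
  have hkj : (k == j) = false := by simp [hne]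
  have hjk : (j == k) = false := by simp [Ne.symm hne]
  have key : ∀ (cj ck : Bool), d.contains j = cj → d.contains k = ck → (cj || ck) = true →
      ((d.insert j vj).insert k vk).items = ((d.insert k vk).insert j vj).items := by
    intro cj ck hcj hck hor
    cases cj <;> cases ck <;> simp at hor <;>
      simp [PySem.Dict.items_insert, PySem.Dict.contains_insert, hcj, hck, hkj, hjk,
            List.map_map]
    · intro h; exact absurd h (Ne.symm hne)
    · intro h; exact absurd h hne
    · intro a b _
      by_cases h1 : a = j <;> by_cases h2 : a = k <;>
        simp [h1, h2, hne, Ne.symm hne]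
  rcases hc with cj | ck
  · exact key _ _ cj rfl (by simp)
  · exact key _ _ rfl ck (by simp)

-- bumps at distinct keys commute as soon as one of the keys is already present
theorem bump_comm (d : PySem.Dict Int Int) (j a k b : Int) (hne : k ≠ j)
    (hc : d.contains j = true ∨ d.contains k = true) :
    bump (bump d j a) k b = bump (bump d k b) j a := by
  simp only [bump, PySem.Dict.getD_insert, if_neg hne, if_neg (Ne.symm hne)]
  exact insert_insert_comm d j k _ _ hne hc

-- B's closed-form pass: every increment scaled by the iteration count m
def chainB (ks : List (Int × Int)) (m : Int) (d : PySem.Dict Int Int) : PySem.Dict Int Int :=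
  ks.foldl (fun d p => bump d p.1 (p.2 * m)) d

theorem contains_bump_self (d : PySem.Dict Int Int) (k c : Int) :
    (bump d k c).contains k = true := PySem.Dict.contains_insert_self _ _ _

theorem contains_bump (d : PySem.Dict Int Int) (j c k : Int) (h : d.contains k = true) :
    (bump d j c).contains k = true := by
  simp only [bump, PySem.Dict.contains_insert, h, Bool.or_true]

theorem chainB_cons (p : Int × Int) (t : List (Int × Int)) (m : Int) (d : PySem.Dict Int Int) :
    chainB (p :: t) m d = chainB t m (bump d p.1 (p.2 * m)) := rfl

-- a bump at a key not touched by the chain moves through it (key present)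
theorem bump_chainB (ks : List (Int × Int)) (m : Int) (d : PySem.Dict Int Int)
    (k c : Int) (hk : k ∉ ks.map Prod.fst) (hd : d.contains k = true) :
    bump (chainB ks m d) k c = chainB ks m (bump d k c) := by
  induction ks generalizing d with
  | nil => rfl
  | cons p t ih =>
      have hk1 : k ≠ p.1 := fun h => hk (by simp [h])
      have hk2 : k ∉ t.map Prod.fst := fun h => hk (by simp [h])
      rw [chainB_cons, chainB_cons, ih _ hk2 (contains_bump _ _ _ _ hd),
          bump_comm _ _ _ _ _ hk1 (Or.inr hd)]

-- two closed-form passes over the same distinct keys fuse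
theorem chainB_chainB (ks : List (Int × Int)) (a b : Int) (d : PySem.Dict Int Int)
    (h : (ks.map Prod.fst).Nodup) :
    chainB ks a (chainB ks b d) = chainB ks (b + a) d := by
  induction ks generalizing d with
  | nil => rfl
  | cons p t ih =>
      simp only [List.map_cons, List.nodup_cons] at h
      rw [chainB_cons, chainB_cons, chainB_cons,
          bump_chainB t b (bump d p.1 (p.2 * b)) p.1 (p.2 * a) h.1 (contains_bump_self _ _ _),
          bump_bump_self, show p.2 * b + p.2 * a = p.2 * (b + a) by ring, ih _ h.2]

-- A's 3D BIN/BUBIN loop body collapses to one closed-form pass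
theorem step3D_eq (d : PySem.Dict Int Int) :
    bump (bump (bump (bump (bump (bump (bump (bump (bump (bump (bump d 6 1) 5 2) 4 1)
        6 1) 5 3) 4 4) 3 3) 2 1) 6 1) 5 2) 4 1
      = chainB [(6, 3), (5, 7), (4, 6), (3, 3), (2, 1)] 1 d := by
  have e1 : ∀ d : PySem.Dict Int Int,
      bump (bump (bump (bump d 6 1) 5 2) 4 1) 6 1 = bump (bump (bump d 6 2) 5 2) 4 1 := by
    intro d
    rw [bump_comm (bump (bump d 6 1) 5 2) 4 1 6 1 (by decide)
          (Or.inr (contains_bump _ _ _ _ (contains_bump_self d 6 1))),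
        bump_comm (bump d 6 1) 5 2 6 1 (by decide) (Or.inr (contains_bump_self d 6 1)),
        bump_bump_self]
    norm_num
  have e2 : ∀ d : PySem.Dict Int Int,
      bump (bump (bump (bump d 6 2) 5 2) 4 1) 5 3 = bump (bump (bump d 6 2) 5 5) 4 1 := by
    intro d
    rw [bump_comm (bump (bump d 6 2) 5 2) 4 1 5 3 (by decide)
          (Or.inr (contains_bump_self _ 5 2)),
        bump_bump_self]
    norm_num
  have e4 : ∀ d : PySem.Dict Int Int,
      bump (bump (bump (bump (bump (bump d 6 2) 5 5) 4 5) 3 3) 2 1) 6 1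
        = bump (bump (bump (bump (bump d 6 3) 5 5) 4 5) 3 3) 2 1 := by
    intro d
    rw [bump_comm (bump (bump (bump (bump d 6 2) 5 5) 4 5) 3 3) 2 1 6 1 (by decide)
          (Or.inr (contains_bump _ _ _ _ (contains_bump _ _ _ _
            (contains_bump _ _ _ _ (contains_bump_self d 6 2))))),
        bump_comm (bump (bump (bump d 6 2) 5 5) 4 5) 3 3 6 1 (by decide)
          (Or.inr (contains_bump _ _ _ _ (contains_bump _ _ _ _ (contains_bump_self d 6 2)))),
        bump_comm (bump (bump d 6 2) 5 5) 4 5 6 1 (by decide)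
          (Or.inr (contains_bump _ _ _ _ (contains_bump_self d 6 2))),
        bump_comm (bump d 6 2) 5 5 6 1 (by decide) (Or.inr (contains_bump_self d 6 2)),
        bump_bump_self]
    norm_num
  have e5 : ∀ d : PySem.Dict Int Int,
      bump (bump (bump (bump (bump (bump d 6 3) 5 5) 4 5) 3 3) 2 1) 5 2
        = bump (bump (bump (bump (bump d 6 3) 5 7) 4 5) 3 3) 2 1 := by
    intro d
    rw [bump_comm (bump (bump (bump (bump d 6 3) 5 5) 4 5) 3 3) 2 1 5 2 (by decide)
          (Or.inr (contains_bump _ _ _ _ (contains_bump _ _ _ _ (contains_bump_self _ 5 5)))),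
        bump_comm (bump (bump (bump d 6 3) 5 5) 4 5) 3 3 5 2 (by decide)
          (Or.inr (contains_bump _ _ _ _ (contains_bump_self _ 5 5))),
        bump_comm (bump (bump d 6 3) 5 5) 4 5 5 2 (by decide)
          (Or.inr (contains_bump_self _ 5 5)),
        bump_bump_self]
    norm_num
  have e6 : ∀ d : PySem.Dict Int Int,
      bump (bump (bump (bump (bump (bump d 6 3) 5 7) 4 5) 3 3) 2 1) 4 1
        = bump (bump (bump (bump (bump d 6 3) 5 7) 4 6) 3 3) 2 1 := by
    intro d
    rw [bump_comm (bump (bump (bump (bump d 6 3) 5 7) 4 5) 3 3) 2 1 4 1 (by decide)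
          (Or.inr (contains_bump _ _ _ _ (contains_bump_self _ 4 5))),
        bump_comm (bump (bump (bump d 6 3) 5 7) 4 5) 3 3 4 1 (by decide)
          (Or.inr (contains_bump_self _ 4 5)),
        bump_bump_self]
    norm_num
  rw [e1, e2, bump_bump_self, show (1 : Int) + 4 = 5 by norm_num, e4, e5, e6]
  simp [chainB]

-- A's loop over range(2, 2+n) is n closed-form passes, i.e. one pass scaled by n
theorem loop_eq (step : PySem.Dict Int Int → PySem.Dict Int Int) (ks : List (Int × Int))
    (hstep : ∀ d, step d = chainB ks 1 d) (hnd : (ks.map Prod.fst).Nodup) :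
    ∀ (n : Nat), 1 ≤ n → ∀ (d : PySem.Dict Int Int),
      (PySem.List.pyRange 2 (2 + (n : Int)) 1).foldl (fun d _ => step d) d = chainB ks (n : Int) d := by
  intro n hn
  induction n, hn using Nat.le_induction with
  | base =>
      intro d
      rw [show ((2 : Int) + ((1 : Nat) : Int)) = 2 + 1 by norm_num,
          PySem.List.pyRange_one_singleton]
      simpa using hstep d
  | succ n hn ih =>
      intro d
      rw [show ((2 : Int) + ((n + 1 : Nat) : Int)) = (2 + (n : Int)) + 1 by push_cast; ring,
          PySem.List.pyRange_one_succ_right (a := 2) (b := 2 + (n : Int)) (by omega),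
          List.foldl_append]
      simp only [List.foldl_cons, List.foldl_nil]
      rw [ih d, hstep, chainB_chainB ks 1 (n : Int) _ hnd]
      push_cast
      ring_nf

theorem step2D_eq (d : PySem.Dict Int Int) :
    bump (bump (bump d 4 1) 3 4) 2 6 = chainB [(4, 1), (3, 4), (2, 6)] 1 d := by
  simp [chainB]

theorem stepOH3_eq (d : PySem.Dict Int Int) :
    bump d 2 12 = chainB [(2, 12)] 1 d := by simp [chainB]

theorem stepOH2_eq (d : PySem.Dict Int Int) :
    bump d 2 8 = chainB [(2, 8)] 1 d := by simp [chainB]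

-- one selected branch: A's loop equals B's guarded closed-form pass
theorem main_branch (gd : List (Int × Int)) (C : Int)
    (step : PySem.Dict Int Int → PySem.Dict Int Int) (ks : List (Int × Int))
    (hstep : ∀ d, step d = chainB ks 1 d) (hnd : (ks.map Prod.fst).Nodup) :
    ((PySem.List.pyRange 2 (2 + C) 1).foldl (fun d _ => step d) (PySem.Dict.mk gd)).items
      = if (if C < 0 then 0 else C) = 0 then gd
        else (chainB ks (if C < 0 then 0 else C) (PySem.Dict.mk gd)).items := by
  by_cases h : C ≤ 0
  · rw [PySem.List.pyRange_one_eq_nil (by omega), if_pos (by split <;> omega)]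
    rfl
  · rw [if_neg (by split <;> omega), if_neg (by omega)]
    obtain ⟨n, hn1, hn2⟩ : ∃ n : Nat, 1 ≤ n ∧ (n : Int) = C := ⟨C.toNat, by omega, by omega⟩
    rw [← hn2]
    exact congrArg PySem.Dict.items (loop_eq step ks hstep hnd n hn1 _)

theorem gates_back_dir_spec : Claim_equal_gates_back_dir := by
  unfold Claim_equal_gates_back_dir
  intro gd N two_D enc _ _
  unfold Spec_gates_back_dir gates_back_dir gates_back_dir_alt
  by_cases hbin : enc = "BIN" ∨ enc = "BUBIN"
  · cases two_D with
    | false =>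
        simp only [hbin, if_true, Bool.not_false, if_pos]
        rw [show N - 3 = 2 + (N - 5) by ring]
        exact main_branch gd (N - 5) _ _ step3D_eq (by decide)
    | true =>
        simp only [hbin, if_true, Bool.not_true, Bool.false_eq_true, if_false]
        rw [show 2 * N - 8 = 2 + (2 * N - 10) by ring]
        exact main_branch gd (2 * N - 10) _ _ step2D_eq (by decide)
  · by_cases hoh : enc = "OH"
    · cases two_D with
      | false =>
          simp only [hbin, hoh, if_false, if_true, Bool.not_false]
          rw [show N - 3 = 2 + (N - 5) by ring]
          exact main_branch gd (N - 5) _ _ stepOH3_eq (by decide)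
      | true =>
          simp only [hbin, hoh, if_false, if_true, Bool.not_true, Bool.false_eq_true]
          rw [show 2 * N - 8 = 2 + (2 * N - 10) by ring]
          exact main_branch gd (2 * N - 10) _ _ stepOH2_eq (by decide)
    · simp only [hbin, hoh, if_false]
      cases two_D <;> simp [List.foldl_nil]
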